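-- pv_equiv track=rewrite | github.com/kpatil1424/EXL_Cert_pbm | final_version_pp_rr_pr_24_july_working (1)/claim_validation.py | parse_rulebook_markdown
-- ===== SOURCE A (Python) =====
-- def parse_rulebook_markdown(markdown_content):
--     """
--     Parses the rulebook Markdown content and extracts rule details.
--     Returns a list of rule dictionaries.
--     """
--     rules = []
--     current_section = None
--     current_rule = {}
--
--     lines = markdown_content.split('\n')
--     for line in lines:
--         line = line.strip()
--
--         if line.startswith('## '):  # Main section
--             current_section = line[3:].strip()
--             continue
--         elif line.startswith('### '):  # Subsection
--             current_section = line[4:].strip()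
--             continue
--         elif line.startswith('#### Rule:'):
--             if current_rule:
--                 rules.append(current_rule)
--             current_rule = {'Rule Name': line[len('#### Rule:'):].strip()}
--             current_rule['Section'] = current_section
--         elif current_rule and line.startswith('**Cause**:'):
--             current_rule['Cause'] = line[len('**Cause**:'):].strip()
--         elif current_rule and line.startswith('**Effect**:'):
--             current_rule['Effect'] = line[len('**Effect**:'):].strip()
--         elif current_rule and line.startswith('**Node_Type**:'):
--             current_rule['Node_Type'] = line[len('**Node_Type**:'):].strip()
--         elif current_rule and line.startswith('**Parent_Node**:'):
--             current_rule['Parent_Node'] = line[len('**Parent_Node**:'):].strip()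
--         elif current_rule and line.startswith('**Precondition**:'):
--             current_rule['Precondition'] = line[len('**Precondition**:'):].strip()
--         elif current_rule and line.startswith('**Edge_Type**:'):
--             current_rule['Edge_Type'] = line[len('**Edge_Type**:'):].strip()
--         elif current_rule and line.startswith('**Edge_Target**:'):
--             current_rule['Edge_Target'] = line[len('**Edge_Target**:'):].strip()
--
--     if current_rule:
--         rules.append(current_rule)
--
--     return rules
-- ===== SOURCE B (Python) =====
-- FIELDS = [
--     ('**Cause**:', 'Cause'),
--     ('**Effect**:', 'Effect'),
--     ('**Node_Type**:', 'Node_Type'),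
--     ('**Parent_Node**:', 'Parent_Node'),
--     ('**Precondition**:', 'Precondition'),
--     ('**Edge_Type**:', 'Edge_Type'),
--     ('**Edge_Target**:', 'Edge_Target'),
-- ]
--
--
-- def parse_rulebook_markdown(markdown_content):
--     """Parse the rulebook Markdown into a list of rule dicts.
--
--     Two-phase scan over the stripped lines: a preamble loop skips prose while
--     tracking the active section; then an outer loop emits one rule per
--     iteration, with an inner loop that consumes that rule's body (field lines
--     dispatched through the FIELDS marker table, section headers updating the
--     section for later rules) until the next '#### Rule:' header.
--     """
--     lines = [raw.strip() for raw in markdown_content.split('\n')]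
--     n = len(lines)
--     section = None
--
--     # preamble: skip until the first rule header
--     i = 0
--     while i < n and not lines[i].startswith('#### Rule:'):
--         l = lines[i]
--         if l.startswith('## '):
--             section = l[3:].strip()
--         elif l.startswith('### '):
--             section = l[4:].strip()
--         i += 1
--
--     rules = []
--     while i < n:  # one rule per iteration; lines[i] is a '#### Rule:' header
--         rule = {'Rule Name': lines[i][len('#### Rule:'):].strip(),
--                 'Section': section}
--         i += 1
--         while i < n and not lines[i].startswith('#### Rule:'):
--             l = lines[i]
--             if l.startswith('## '):
--                 section = l[3:].strip()
--             elif l.startswith('### '):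
--                 section = l[4:].strip()
--             else:
--                 for marker, key in FIELDS:
--                     if l.startswith(marker):
--                         rule[key] = l[len(marker):].strip()
--                         break
--             i += 1
--         rules.append(rule)
--     return rules
-- ===== Notes on version B (the rewrite author's own statement) =====
-- stated objective: alternative
-- what changed: B replaces A's single flag-driven pass (a current_rule dict that is flushed on each new header and guards every field branch) with a two-phase nested-loop scan: a preamble loop skips prose while tracking the section, then an outer loop emits one rule per iteration whose inner loop consumes exactly that rule's body, dispatching field lines through a marker table; Pre_ excludes inputs where a rule header precedes every section header, since there A stores Python None (not a string) as 'Section'.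
import Mathlib
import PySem

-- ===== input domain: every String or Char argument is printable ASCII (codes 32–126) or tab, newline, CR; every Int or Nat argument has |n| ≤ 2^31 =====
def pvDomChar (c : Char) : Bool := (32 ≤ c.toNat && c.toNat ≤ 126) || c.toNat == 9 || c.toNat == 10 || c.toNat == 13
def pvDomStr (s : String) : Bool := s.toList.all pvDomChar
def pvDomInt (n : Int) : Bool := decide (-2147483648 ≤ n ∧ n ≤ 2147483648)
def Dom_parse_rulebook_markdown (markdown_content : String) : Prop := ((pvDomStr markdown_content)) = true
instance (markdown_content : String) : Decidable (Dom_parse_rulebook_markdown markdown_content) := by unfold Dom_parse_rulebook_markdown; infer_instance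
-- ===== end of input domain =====

-- B replaces A's flag-driven single pass (current_rule + flush) with a two-phase nested-loop scan:
-- a preamble loop, then one rule emitted per outer iteration with an inner body loop and a marker
-- table for the seven fields (objective: alternative, same cost); equivalence is about the return value.

-- ===== PORT A =====
-- loop state: (rules, current_section, current_rule)
def pvStateA := List (PySem.Dict String String) × Option String × PySem.Dict String String

-- one iteration of A's `for line in lines` body (branches in A's order).
-- `current_section` is an Option String; when A stores a Python `None` as 'Section' (only on inputs
-- excluded by Pre_, where no section header precedes the rule) the port stores "" instead.
def pvStepA (st : pvStateA) (l : String) : pvStateA :=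
  let rules := st.1
  let sec := st.2.1
  let cur := st.2.2
  let line := PySem.Str.strip l
  if PySem.Str.startswith line "## " then
    (rules, some (PySem.Str.strip (PySem.Str.slice line (some 3) none)), cur)
  else if PySem.Str.startswith line "### " then
    (rules, some (PySem.Str.strip (PySem.Str.slice line (some 4) none)), cur)
  else if PySem.Str.startswith line "#### Rule:" then
    let rules := if cur.items = [] then rules else rules ++ [cur]
    let cur := PySem.Dict.insert PySem.Dict.empty "Rule Name"
                 (PySem.Str.strip (PySem.Str.slice line (some 10) none))
    let cur := PySem.Dict.insert cur "Section" (sec.getD "")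
    (rules, sec, cur)
  else if cur.items ≠ [] ∧ PySem.Str.startswith line "**Cause**:" = true then
    (rules, sec, PySem.Dict.insert cur "Cause" (PySem.Str.strip (PySem.Str.slice line (some 10) none)))
  else if cur.items ≠ [] ∧ PySem.Str.startswith line "**Effect**:" = true then
    (rules, sec, PySem.Dict.insert cur "Effect" (PySem.Str.strip (PySem.Str.slice line (some 11) none)))
  else if cur.items ≠ [] ∧ PySem.Str.startswith line "**Node_Type**:" = true then
    (rules, sec, PySem.Dict.insert cur "Node_Type" (PySem.Str.strip (PySem.Str.slice line (some 14) none)))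
  else if cur.items ≠ [] ∧ PySem.Str.startswith line "**Parent_Node**:" = true then
    (rules, sec, PySem.Dict.insert cur "Parent_Node" (PySem.Str.strip (PySem.Str.slice line (some 16) none)))
  else if cur.items ≠ [] ∧ PySem.Str.startswith line "**Precondition**:" = true then
    (rules, sec, PySem.Dict.insert cur "Precondition" (PySem.Str.strip (PySem.Str.slice line (some 17) none)))
  else if cur.items ≠ [] ∧ PySem.Str.startswith line "**Edge_Type**:" = true then
    (rules, sec, PySem.Dict.insert cur "Edge_Type" (PySem.Str.strip (PySem.Str.slice line (some 14) none)))
  else if cur.items ≠ [] ∧ PySem.Str.startswith line "**Edge_Target**:" = true then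
    (rules, sec, PySem.Dict.insert cur "Edge_Target" (PySem.Str.strip (PySem.Str.slice line (some 16) none)))
  else
    (rules, sec, cur)

def parse_rulebook_markdown (markdown_content : String) : List (List (String × String)) :=
  -- split('\n'): split? is exact here since the separator is non-empty (never none)
  let lines := (PySem.Str.split? markdown_content "\n").getD []
  let st := lines.foldl pvStepA ([], none, PySem.Dict.empty)
  let rules := if st.2.2.items = [] then st.1 else st.1 ++ [st.2.2]
  rules.map PySem.Dict.items

-- ===== PORT B =====
-- the FIELDS marker table of Source B
def pvFields : List (String × String) :=
  [("**Cause**:", "Cause"), ("**Effect**:", "Effect"), ("**Node_Type**:", "Node_Type"),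
   ("**Parent_Node**:", "Parent_Node"), ("**Precondition**:", "Precondition"),
   ("**Edge_Type**:", "Edge_Type"), ("**Edge_Target**:", "Edge_Target")]

-- `for marker, key in FIELDS: if l.startswith(marker): rule[key] = …; break`
def pvApplyField (tbl : List (String × String)) (line : String) (d : PySem.Dict String String) :
    PySem.Dict String String :=
  match tbl with
  | [] => d
  | (p, k) :: rest =>
    if PySem.Str.startswith line p then
      PySem.Dict.insert d k (PySem.Str.strip (PySem.Str.slice line (some (PySem.Str.len p)) none))
    else pvApplyField rest line d

-- rule = {'Rule Name': …, 'Section': section}; a Python None section (outside Pre_) is stored as ""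
def pvNewRule (line : String) (sec : Option String) : PySem.Dict String String :=
  PySem.Dict.insert
    (PySem.Dict.insert PySem.Dict.empty "Rule Name"
      (PySem.Str.strip (PySem.Str.slice line (some 10) none)))
    "Section" (sec.getD "")

-- preamble while-loop: skip to the first rule header, tracking the section;
-- returns (section, remaining lines — empty or starting with a rule header)
def pvSkipPreamble (lines : List String) (sec : Option String) : Option String × List String :=
  match lines with
  | [] => (sec, [])
  | l :: rest =>
    if PySem.Str.startswith l "#### Rule:" then (sec, l :: rest)
    else if PySem.Str.startswith l "## " then
      pvSkipPreamble rest (some (PySem.Str.strip (PySem.Str.slice l (some 3) none)))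
    else if PySem.Str.startswith l "### " then
      pvSkipPreamble rest (some (PySem.Str.strip (PySem.Str.slice l (some 4) none)))
    else pvSkipPreamble rest sec

-- inner while-loop: fill one rule's fields until the next rule header;
-- returns (rule, section, remaining lines)
def pvRuleBody (rule : PySem.Dict String String) (sec : Option String) (lines : List String) :
    PySem.Dict String String × Option String × List String :=
  match lines with
  | [] => (rule, sec, [])
  | l :: rest =>
    if PySem.Str.startswith l "#### Rule:" then (rule, sec, l :: rest)
    else if PySem.Str.startswith l "## " then
      pvRuleBody rule (some (PySem.Str.strip (PySem.Str.slice l (some 3) none))) rest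
    else if PySem.Str.startswith l "### " then
      pvRuleBody rule (some (PySem.Str.strip (PySem.Str.slice l (some 4) none))) rest
    else pvRuleBody (pvApplyField pvFields l rule) sec rest

-- the inner loop only consumes lines (needed for pvRulesLoop's termination)
theorem pvRuleBody_len (lines : List String) (rule : PySem.Dict String String) (sec : Option String) :
    (pvRuleBody rule sec lines).2.2.length ≤ lines.length := by
  induction lines generalizing rule sec with
  | nil => simp [pvRuleBody]
  | cons l rest ih =>
    simp only [pvRuleBody]
    split_ifs
    · simp
    · exact Nat.le_succ_of_le (ih _ _)
    · exact Nat.le_succ_of_le (ih _ _)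
    · exact Nat.le_succ_of_le (ih _ _)

-- outer while-loop: one rule per iteration (its head line is the rule header)
def pvRulesLoop (lines : List String) (sec : Option String) : List (PySem.Dict String String) :=
  match lines with
  | [] => []
  | l :: rest =>
    let t := pvRuleBody (pvNewRule l sec) sec rest
    t.1 :: pvRulesLoop t.2.2 t.2.1
termination_by lines.length
decreasing_by
  simpa using Nat.lt_succ_of_le (pvRuleBody_len rest (pvNewRule l sec) sec)

def parse_rulebook_markdown_alt (markdown_content : String) : List (List (String × String)) :=
  let lines := ((PySem.Str.split? markdown_content "\n").getD []).map PySem.Str.strip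
  let p := pvSkipPreamble lines none
  (pvRulesLoop p.2 p.1).map PySem.Dict.items

-- ===== PRECONDITION & SPEC =====
-- Pre_ excludes inputs where a '#### Rule:' line precedes every '## '/'### ' section header: there
-- A stores Python None (not a string) as the rule's 'Section' value, which leaves the declared
-- List (String × String) type; B does the same in Python, and both ports store "" instead.
def Pre_parse_rulebook_markdown (markdown_content : String) : Prop :=
  (((PySem.Str.split? markdown_content "\n").getD []).map PySem.Str.strip
    |>.takeWhile (fun l => !(PySem.Str.startswith l "## " || PySem.Str.startswith l "### "))
    |>.all (fun l => !PySem.Str.startswith l "#### Rule:")) = true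
instance (markdown_content : String) : Decidable (Pre_parse_rulebook_markdown markdown_content) := by
  unfold Pre_parse_rulebook_markdown; infer_instance

def pvWitness_parse_rulebook_markdown : String := "## Claims\n#### Rule: R1\n**Cause**: a claim\n**Effect**: reject"

def Spec_parse_rulebook_markdown (markdown_content : String) (out : List (List (String × String))) : Prop := out = parse_rulebook_markdown_alt markdown_content
instance (markdown_content : String) (out : List (List (String × String))) : Decidable (Spec_parse_rulebook_markdown markdown_content out) := by unfold Spec_parse_rulebook_markdown; infer_instance

-- ===== CLAIM (what is proved, stated in full; the proofs are below) =====
def Claim_equal_parse_rulebook_markdown : Prop := ∀ (markdown_content : String), Dom_parse_rulebook_markdown markdown_content → Pre_parse_rulebook_markdown markdown_content → Spec_parse_rulebook_markdown markdown_content (parse_rulebook_markdown markdown_content)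

-- ===== LEMMAS AND PROOFS =====

-- A's finalisation (the trailing `if current_rule: rules.append(current_rule)`)
def pvFinal (st : pvStateA) : List (PySem.Dict String String) :=
  if st.2.2.items = [] then st.1 else st.1 ++ [st.2.2]

-- B's continuation once a rule is open: finish its body, then loop
def pvContB (cur : PySem.Dict String String) (sec : Option String) (lines : List String) :
    List (PySem.Dict String String) :=
  let t := pvRuleBody cur sec lines
  t.1 :: pvRulesLoop t.2.2 t.2.1

theorem pvInsert_ne_nil (d : PySem.Dict String String) (k v : String) :
    (PySem.Dict.insert d k v).items ≠ [] := by
  rw [PySem.Dict.items_insert]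
  split_ifs with hco
  · intro h
    have hk : k ∈ d.keys := (PySem.Dict.contains_iff_mem_keys _ _).mp hco
    have hnil : d.items = [] := List.map_eq_nil_iff.mp h
    simp [PySem.Dict.keys, hnil] at hk
  · simp

-- prefix exclusivity: a '## ' / '### ' header line is never a '#### Rule:' line
theorem pv_h2_no_rule (s : String) (h : PySem.Str.startswith s "## " = true) :
    PySem.Str.startswith s "#### Rule:" = false := by
  by_contra hne
  rw [Bool.not_eq_false] at hne
  simp only [PySem.Str.startswith_eq] at h hne
  rw [PySem.Chars.startswith_iff] at h hne
  have := List.prefix_of_prefix_length_le h hne (by decide)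
  revert this; decide

theorem pv_h3_no_rule (s : String) (h : PySem.Str.startswith s "### " = true) :
    PySem.Str.startswith s "#### Rule:" = false := by
  by_contra hne
  rw [Bool.not_eq_false] at hne
  simp only [PySem.Str.startswith_eq] at h hne
  rw [PySem.Chars.startswith_iff] at h hne
  have := List.prefix_of_prefix_length_le h hne (by decide)
  revert this; decide

theorem pvApplyField_ne_nil (tbl : List (String × String)) (line : String)
    (d : PySem.Dict String String) (hd : d.items ≠ []) :
    (pvApplyField tbl line d).items ≠ [] := by
  induction tbl generalizing d with
  | nil => exact hd
  | cons e rest ih =>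
    obtain ⟨p, k⟩ := e
    simp only [pvApplyField]
    split_ifs
    · exact pvInsert_ne_nil _ _ _
    · exact ih _ hd

-- A's seven guarded elif branches on an open rule = B's first-match walk over the FIELDS table
theorem pvNewRule_ne_nil (line : String) (sec : Option String) :
    (pvNewRule line sec).items ≠ [] := by
  rw [pvNewRule]; exact pvInsert_ne_nil _ _ _

theorem pvStepA_field (rules : List (PySem.Dict String String)) (sec : Option String)
    (cur : PySem.Dict String String) (l : String)
    (h1 : PySem.Str.startswith (PySem.Str.strip l) "## " = false)
    (h2 : PySem.Str.startswith (PySem.Str.strip l) "### " = false)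
    (h3 : PySem.Str.startswith (PySem.Str.strip l) "#### Rule:" = false)
    (hc : cur.items ≠ []) :
    pvStepA (rules, sec, cur) l = (rules, sec, pvApplyField pvFields (PySem.Str.strip l) cur) := by
  unfold pvStepA
  simp only [h1, h2, h3, Bool.false_eq_true, if_false]
  simp only [pvFields, pvApplyField,
    show PySem.Str.len "**Cause**:" = 10 from by decide,
    show PySem.Str.len "**Effect**:" = 11 from by decide,
    show PySem.Str.len "**Node_Type**:" = 14 from by decide,
    show PySem.Str.len "**Parent_Node**:" = 16 from by decide,
    show PySem.Str.len "**Precondition**:" = 17 from by decide,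
    show PySem.Str.len "**Edge_Type**:" = 14 from by decide,
    show PySem.Str.len "**Edge_Target**:" = 16 from by decide]
  simp only [hc, ne_eq, not_false_iff, true_and]
  split_ifs <;> rfl

-- closing one rule's body at the next rule header
theorem pvContB_rule (cur : PySem.Dict String String) (sec : Option String) (x : String)
    (ls : List String) (hx : PySem.Str.startswith x "#### Rule:" = true) :
    pvContB cur sec (x :: ls) = cur :: pvContB (pvNewRule x sec) sec ls := by
  simp only [pvContB, pvRuleBody, hx, if_true, pvRulesLoop]

theorem pvBody_eq (lines : List String) (rules : List (PySem.Dict String String))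
    (sec : Option String) (cur : PySem.Dict String String) (hc : cur.items ≠ []) :
    pvFinal (lines.foldl pvStepA (rules, sec, cur))
      = rules ++ pvContB cur sec (lines.map PySem.Str.strip) := by
  induction lines generalizing rules sec cur with
  | nil =>
    simp only [List.foldl_nil, List.map_nil, pvFinal, pvContB, pvRuleBody, pvRulesLoop, if_neg hc]
  | cons l rest ih =>
    rw [List.foldl_cons, List.map_cons]
    by_cases h1 : PySem.Str.startswith (PySem.Str.strip l) "## " = true
    · have hr := pv_h2_no_rule _ h1
      have hA : pvStepA (rules, sec, cur) l
          = (rules, some (PySem.Str.strip (PySem.Str.slice (PySem.Str.strip l) (some 3) none)), cur) := by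
        unfold pvStepA; simp only [h1, if_true]
      rw [hA, ih _ _ _ hc]
      simp only [pvContB, pvRuleBody, hr, Bool.false_eq_true, if_false, h1, if_true]
    · by_cases h2 : PySem.Str.startswith (PySem.Str.strip l) "### " = true
      · have hr := pv_h3_no_rule _ h2
        have hA : pvStepA (rules, sec, cur) l
            = (rules, some (PySem.Str.strip (PySem.Str.slice (PySem.Str.strip l) (some 4) none)), cur) := by
          unfold pvStepA
          simp only [h1, Bool.false_eq_true, if_false, h2, if_true]
        rw [hA, ih _ _ _ hc]
        simp only [pvContB, pvRuleBody, hr, Bool.false_eq_true, if_false, h1, h2, if_true]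
      · by_cases h3 : PySem.Str.startswith (PySem.Str.strip l) "#### Rule:" = true
        · -- next rule header: A flushes cur, B closes the body and loops
          have hA : pvStepA (rules, sec, cur) l
              = (rules ++ [cur], sec, pvNewRule (PySem.Str.strip l) sec) := by
            unfold pvStepA
            simp only [h1, h2, Bool.false_eq_true, if_false, h3, if_true, if_neg hc, pvNewRule]
          rw [hA, ih _ _ _ (pvNewRule_ne_nil _ _), pvContB_rule _ _ _ _ h3,
            List.append_assoc, List.singleton_append]
        · simp only [Bool.not_eq_true] at h1 h2 h3
          rw [pvStepA_field rules sec cur l h1 h2 h3 hc,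
            ih _ _ _ (pvApplyField_ne_nil _ _ _ hc)]
          simp only [pvContB, pvRuleBody, h3, Bool.false_eq_true, if_false, h1, h2]

theorem pvPreamble_eq (lines : List String) (sec : Option String) :
    pvFinal (lines.foldl pvStepA ([], sec, PySem.Dict.empty))
      = (let p := pvSkipPreamble (lines.map PySem.Str.strip) sec; pvRulesLoop p.2 p.1) := by
  have hemp : (PySem.Dict.empty : PySem.Dict String String).items = [] := rfl
  induction lines generalizing sec with
  | nil => simp only [List.foldl_nil, List.map_nil, pvFinal, hemp, if_pos, pvSkipPreamble, pvRulesLoop]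
  | cons l rest ih =>
    rw [List.foldl_cons, List.map_cons]
    by_cases h1 : PySem.Str.startswith (PySem.Str.strip l) "## " = true
    · have hr := pv_h2_no_rule _ h1
      have hA : pvStepA ([], sec, PySem.Dict.empty) l
          = ([], some (PySem.Str.strip (PySem.Str.slice (PySem.Str.strip l) (some 3) none)), PySem.Dict.empty) := by
        unfold pvStepA; simp only [h1, if_true]
      rw [hA, ih]
      simp only [pvSkipPreamble, hr, Bool.false_eq_true, if_false, h1, if_true]
    · by_cases h2 : PySem.Str.startswith (PySem.Str.strip l) "### " = true
      · have hr := pv_h3_no_rule _ h2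
        have hA : pvStepA ([], sec, PySem.Dict.empty) l
            = ([], some (PySem.Str.strip (PySem.Str.slice (PySem.Str.strip l) (some 4) none)), PySem.Dict.empty) := by
          unfold pvStepA
          simp only [h1, Bool.false_eq_true, if_false, h2, if_true]
        rw [hA, ih]
        simp only [pvSkipPreamble, hr, Bool.false_eq_true, if_false, h1, h2, if_true]
      · by_cases h3 : PySem.Str.startswith (PySem.Str.strip l) "#### Rule:" = true
        · -- first rule header: A opens cur, B leaves the preamble and enters the rules loop
          have hA : pvStepA ([], sec, PySem.Dict.empty) l
              = ([], sec, pvNewRule (PySem.Str.strip l) sec) := by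
            unfold pvStepA
            simp only [h1, h2, Bool.false_eq_true, if_false, h3, if_true, if_pos hemp, pvNewRule]
          rw [hA, pvBody_eq _ _ _ _ (pvNewRule_ne_nil _ _)]
          simp only [pvSkipPreamble, h3, if_true, List.nil_append]
          rw [pvRulesLoop]
          rfl
        · -- plain prose before the first rule: A ignores it (current_rule is empty), B skips it
          simp only [Bool.not_eq_true] at h1 h2 h3
          have hA : pvStepA ([], sec, PySem.Dict.empty) l = ([], sec, PySem.Dict.empty) := by
            unfold pvStepA
            simp only [h1, h2, h3, Bool.false_eq_true, if_false, hemp, ne_eq,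
              not_true_eq_false, false_and, if_false]
          rw [hA, ih]
          simp only [pvSkipPreamble, h3, h1, h2, Bool.false_eq_true, if_false]

-- ===== VERDICT (by name: the statement is the Claim_ definition above) =====
theorem parse_rulebook_markdown_spec : Claim_equal_parse_rulebook_markdown := by
  intro mc _ _
  show parse_rulebook_markdown mc = parse_rulebook_markdown_alt mc
  unfold parse_rulebook_markdown parse_rulebook_markdown_alt
  have h := pvPreamble_eq ((PySem.Str.split? mc "\n").getD []) none
  simp only [pvFinal] at h
  simp only [h]
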